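-- pv_equiv track=rewrite | github.com/cdjasonj/datagrand | outputs/result_process.py | _get_entities_text_type
-- ===== SOURCE A (Python) =====
-- def _get_entities_text_type(entities):
--     # 每个类型的实体做一个 文本字典
--     a_entities_text = []
--     a_entities = []
--     b_entities_text = []
--     b_entities = []
--     c_entities_text = []
--     c_entities = []
--     for entity in entities:
--         entity_type = entity.split('/')[1]
--         entity_text = entity.split('/')[0]
--         if entity_type == 'a' and entity_text not in a_entities:
--             a_entities_text.append(entity_text)
--             a_entities.append(entity)
--         elif entity_type == 'b' and entity_text not in b_entities:
--             b_entities_text.append(entity_text)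
--             b_entities.append(entity)
--         elif entity_type == 'c' and entity_text not in c_entities:
--             c_entities_text.append(entity_text)
--             c_entities.append(entity)
--     return a_entities, b_entities, c_entities,\
--            a_entities_text, b_entities_text, c_entities_text
-- ===== SOURCE B (Python) =====
-- def _get_entities_text_type(entities):
--     # Per-type filter + map; the original's membership test never removes anything
--     # (texts never contain '/', stored entities always do), so no dedup is needed.
--     def bucket(t):
--         matched = [e for e in entities if e.split('/')[1] == t]
--         texts = [e.split('/')[0] for e in matched]
--         return matched, texts
--     a_entities, a_entities_text = bucket('a')
--     b_entities, b_entities_text = bucket('b')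
--     c_entities, c_entities_text = bucket('c')
--     return a_entities, b_entities, c_entities, \
--            a_entities_text, b_entities_text, c_entities_text
-- ===== Notes on version B (the rewrite author's own statement) =====
-- stated objective: simpler
-- what changed: Replaces the single accumulator loop with growing not-in membership scans by three filter+map comprehensions, dropping the dedup test entirely since it is provably always true (a split text piece never contains '/', stored entities always do).
import Mathlib
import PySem

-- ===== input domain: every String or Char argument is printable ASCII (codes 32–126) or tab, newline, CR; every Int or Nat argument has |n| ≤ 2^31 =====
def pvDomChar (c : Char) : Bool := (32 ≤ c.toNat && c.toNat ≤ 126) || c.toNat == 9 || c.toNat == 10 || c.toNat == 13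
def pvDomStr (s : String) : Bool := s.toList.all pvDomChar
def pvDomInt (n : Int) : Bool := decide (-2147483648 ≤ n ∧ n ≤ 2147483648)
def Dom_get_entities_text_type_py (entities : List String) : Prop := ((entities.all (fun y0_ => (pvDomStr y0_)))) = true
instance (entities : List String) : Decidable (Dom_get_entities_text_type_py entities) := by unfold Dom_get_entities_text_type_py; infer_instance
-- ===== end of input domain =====

-- B replaces A's accumulator loop (whose 'not in' dedup test is provably always true) by three
-- per-type filter+map passes with no dedup; equivalence is about the return value only.

-- ===== PORT A =====
-- one loop iteration of A; split('/')[i] is pyGet? (none = IndexError, excluded by Pre_; .getD "" only totalizes)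
def pvStepA (st : List String × List String × List String × List String × List String × List String)
    (entity : String) : List String × List String × List String × List String × List String × List String :=
  match st with
  | (aE, bE, cE, aT, bT, cT) =>
    let entity_type := (PySem.List.pyGet? ((PySem.Str.split? entity "/").getD []) 1).getD ""
    let entity_text := (PySem.List.pyGet? ((PySem.Str.split? entity "/").getD []) 0).getD ""
    if entity_type == "a" && !(aE.contains entity_text) then
      (aE ++ [entity], bE, cE, aT ++ [entity_text], bT, cT)
    else if entity_type == "b" && !(bE.contains entity_text) then
      (aE, bE ++ [entity], cE, aT, bT ++ [entity_text], cT)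
    else if entity_type == "c" && !(cE.contains entity_text) then
      (aE, bE, cE ++ [entity], aT, bT, cT ++ [entity_text])
    else (aE, bE, cE, aT, bT, cT)

def get_entities_text_type_py (entities : List String) :
    List String × List String × List String × List String × List String × List String :=
  entities.foldl pvStepA ([], [], [], [], [], [])

-- ===== PORT B =====
-- bucket(t) of Source B: filter comprehension, then map comprehension over the matches
def pvBucket (entities : List String) (t : String) : List String × List String :=
  let matched := entities.filter
    (fun e => ((PySem.List.pyGet? ((PySem.Str.split? e "/").getD []) 1).getD "") == t)
  let texts := matched.map
    (fun e => (PySem.List.pyGet? ((PySem.Str.split? e "/").getD []) 0).getD "")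
  (matched, texts)

def get_entities_text_type_py_alt (entities : List String) :
    List String × List String × List String × List String × List String × List String :=
  ((pvBucket entities "a").1, (pvBucket entities "b").1, (pvBucket entities "c").1,
   (pvBucket entities "a").2, (pvBucket entities "b").2, (pvBucket entities "c").2)

-- ===== PRECONDITION & SPEC =====
-- Pre_ excludes exactly the inputs where the Python raises IndexError on split('/')[1]:
-- an entity without '/' (B raises there too).
def Pre_get_entities_text_type_py (entities : List String) : Prop :=
  ∀ e ∈ entities, PySem.Str.isIn "/" e = true
instance (entities : List String) : Decidable (Pre_get_entities_text_type_py entities) := by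
  unfold Pre_get_entities_text_type_py; infer_instance

def pvWitness_get_entities_text_type_py : List String := ["foo/a", "bar/b", "foo/a", "x/d"]

def Spec_get_entities_text_type_py (entities : List String)
    (out : List String × List String × List String × List String × List String × List String) : Prop :=
  out = get_entities_text_type_py_alt entities
instance (entities : List String)
    (out : List String × List String × List String × List String × List String × List String) :
    Decidable (Spec_get_entities_text_type_py entities out) := by
  unfold Spec_get_entities_text_type_py; infer_instance

-- ===== CLAIM (what is proved, stated in full; the proofs are below) =====
def Claim_equal_get_entities_text_type_py : Prop :=
  ∀ (entities : List String), Dom_get_entities_text_type_py entities →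
    Pre_get_entities_text_type_py entities →
    Spec_get_entities_text_type_py entities (get_entities_text_type_py entities)

-- ===== LEMMAS AND PROOFS =====

-- the text piece of e: split('/')[0] is the prefix of e before the first '/'
lemma go_head_acc (c : Char) : ∀ (fuel : Nat) (l cur : List Char) (acc : List (List Char)),
    acc ≠ [] → (PySem.Chars.splitOn.go [c] fuel l cur acc).head? = acc.getLast? := by
  intro fuel
  induction fuel with
  | zero =>
    intro l cur acc hacc
    cases acc with
    | nil => exact absurd rfl hacc
    | cons y ys => simp [PySem.Chars.splitOn.go, List.getLast?_cons]
  | succ n ih =>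
    intro l cur acc hacc
    cases l with
    | nil =>
      cases acc with
      | nil => exact absurd rfl hacc
      | cons y ys => simp [PySem.Chars.splitOn.go, List.getLast?_cons]
    | cons x rest =>
      by_cases h : List.isPrefixOf [c] (x :: rest) = true
      · rw [PySem.Chars.splitOn.go]
        simp only [h, if_true]
        rw [ih _ _ _ (by simp)]
        cases acc with
        | nil => exact absurd rfl hacc
        | cons y ys => simp
      · rw [PySem.Chars.splitOn.go]
        simp only [h, Bool.false_eq_true, if_false]
        exact ih _ _ _ hacc

lemma go_head_nil (c : Char) : ∀ (fuel : Nat) (l cur : List Char), l.length < fuel →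
    (PySem.Chars.splitOn.go [c] fuel l cur []).head? =
      some (cur.reverse ++ l.takeWhile (fun x => x != c)) := by
  intro fuel
  induction fuel with
  | zero => intro l cur h; omega
  | succ n ih =>
    intro l cur h
    cases l with
    | nil => simp [PySem.Chars.splitOn.go]
    | cons x rest =>
      by_cases hx : x = c
      · rw [PySem.Chars.splitOn.go]
        have hpre : List.isPrefixOf [c] (x :: rest) = true := by
          simp [List.isPrefixOf, hx]
        simp only [hpre, if_true]
        rw [go_head_acc c _ _ _ _ (by simp)]
        simp [List.takeWhile, hx]
      · rw [PySem.Chars.splitOn.go]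
        have hpre : List.isPrefixOf [c] (x :: rest) = false := by
          simp [List.isPrefixOf]; exact fun hc => absurd hc.symm hx
        simp only [hpre, Bool.false_eq_true, if_false]
        rw [ih rest (x :: cur) (by simpa using Nat.lt_of_succ_lt_succ h)]
        have hb : (x != c) = true := by simp [hx]
        simp [hb]

lemma text_eq (e : String) :
    (PySem.List.pyGet? ((PySem.Str.split? e "/").getD []) 0).getD "" =
      String.ofList (e.toList.takeWhile (fun x => x != '/')) := by
  have h : PySem.Str.split? e "/" =
      some ((PySem.Chars.splitOn e.toList ['/']).map String.ofList) := by
    simp [PySem.Str.split?, PySem.Chars.split?]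
  rw [h]
  have hh : (PySem.Chars.splitOn e.toList ['/']).head? =
      some (e.toList.takeWhile (fun x => x != '/')) := by
    have := go_head_nil '/' (e.toList.length + 1) e.toList [] (by omega)
    simpa [PySem.Chars.splitOn] using this
  simp [PySem.List.pyGet?, PySem.List.pyIdx?]
  cases hsp : PySem.Chars.splitOn e.toList ['/'] with
  | nil => simp [hsp] at hh
  | cons p ps =>
    rw [hsp] at hh
    simp at hh
    simp [hh]

lemma text_no_slash (e : String) :
    '/' ∉ ((PySem.List.pyGet? ((PySem.Str.split? e "/").getD []) 0).getD "").toList := by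
  rw [text_eq]
  intro hmem
  simp only [String.toList_ofList] at hmem
  have := List.mem_takeWhile_imp hmem
  simp at this

-- the invariant of A's loop: under Pre_, every 'not in' test succeeds, so the fold appends
-- exactly B's per-type filters and their texts
lemma foldA_inv : ∀ (es : List String) (aE bE cE aT bT cT : List String),
    (∀ e ∈ es, '/' ∈ e.toList) →
    (∀ x ∈ aE, '/' ∈ x.toList) → (∀ x ∈ bE, '/' ∈ x.toList) → (∀ x ∈ cE, '/' ∈ x.toList) →
    List.foldl pvStepA (aE, bE, cE, aT, bT, cT) es =
      (aE ++ (pvBucket es "a").1, bE ++ (pvBucket es "b").1, cE ++ (pvBucket es "c").1,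
       aT ++ (pvBucket es "a").2, bT ++ (pvBucket es "b").2, cT ++ (pvBucket es "c").2) := by
  intro es
  induction es with
  | nil => intro aE bE cE aT bT cT _ _ _ _; simp [pvBucket]
  | cons e rest ih =>
    intro aE bE cE aT bT cT hes haE hbE hcE
    have he : '/' ∈ e.toList := hes e (by simp)
    have hrest : ∀ x ∈ rest, '/' ∈ x.toList := fun x hx => hes x (by simp [hx])
    have hnotin : ∀ (L : List String), (∀ x ∈ L, '/' ∈ x.toList) →
        L.contains ((PySem.List.pyGet? ((PySem.Str.split? e "/").getD []) 0).getD "") = false := by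
      intro L hL
      by_contra hcon
      have hmem : ((PySem.List.pyGet? ((PySem.Str.split? e "/").getD []) 0).getD "") ∈ L := by
        simpa using hcon
      exact text_no_slash e (hL _ hmem)
    set T := (PySem.List.pyGet? ((PySem.Str.split? e "/").getD []) 1).getD "" with hT
    set X := (PySem.List.pyGet? ((PySem.Str.split? e "/").getD []) 0).getD "" with hX
    have hstep : pvStepA (aE, bE, cE, aT, bT, cT) e =
        if T == "a" then (aE ++ [e], bE, cE, aT ++ [X], bT, cT)
        else if T == "b" then (aE, bE ++ [e], cE, aT, bT ++ [X], cT)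
        else if T == "c" then (aE, bE, cE ++ [e], aT, bT, cT ++ [X])
        else (aE, bE, cE, aT, bT, cT) := by
      simp only [pvStepA, ← hT, ← hX, hnotin aE haE, hnotin bE hbE, hnotin cE hcE,
        Bool.not_false, Bool.and_true]
    have hbucket : ∀ t : String, pvBucket (e :: rest) t =
        (if T == t then (e :: (pvBucket rest t).1, X :: (pvBucket rest t).2)
         else pvBucket rest t) := by
      intro t
      by_cases h : T = t
      · have hb : (T == t) = true := by simp [h]
        simp [pvBucket, ← hT, ← hX, hb]
      · have hb : (T == t) = false := by simp [h]
        simp [pvBucket, ← hT, hb]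
    simp only [List.foldl_cons, hstep]
    by_cases ha : T = "a"
    · have := ih (aE ++ [e]) bE cE (aT ++ [X]) bT cT hrest
        (by intro x hx; rcases List.mem_append.mp hx with h | h
            · exact haE x h
            · simp at h; subst h; exact he) hbE hcE
      simp [ha, this, hbucket, List.append_assoc]
    · by_cases hb : T = "b"
      · have := ih aE (bE ++ [e]) cE aT (bT ++ [X]) cT hrest haE
          (by intro x hx; rcases List.mem_append.mp hx with h | h
              · exact hbE x h
              · simp at h; subst h; exact he) hcE
        simp [hb, this, hbucket, List.append_assoc]
      · by_cases hc : T = "c"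
        · have := ih aE bE (cE ++ [e]) aT bT (cT ++ [X]) hrest haE hbE
            (by intro x hx; rcases List.mem_append.mp hx with h | h
                · exact hcE x h
                · simp at h; subst h; exact he)
          simp [hc, this, hbucket, List.append_assoc]
        · have := ih aE bE cE aT bT cT hrest haE hbE hcE
          simp [ha, hb, hc, this, hbucket]

-- ===== VERDICT (by name: the statement is the Claim_ definition above) =====
theorem get_entities_text_type_py_spec : Claim_equal_get_entities_text_type_py := by
  intro entities _ hpre
  have hes : ∀ e ∈ entities, '/' ∈ e.toList := by
    intro e he
    have := hpre e he
    rw [PySem.Str.isIn_iff_infix] at this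
    simpa using this.mem (by simp)
  show get_entities_text_type_py entities = get_entities_text_type_py_alt entities
  unfold get_entities_text_type_py get_entities_text_type_py_alt
  rw [foldA_inv entities [] [] [] [] [] [] hes (by simp) (by simp) (by simp)]
  simp
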